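-- pv_equiv track=rewrite | github.com/monica00zhang/Financial-Chatbot | rag/chunk.py | extract_financial_terms_from_letters
-- ===== SOURCE A (Python) =====
-- def extract_financial_terms_from_letters(term_list, letter_detail):
--     """
--     Extract all occurrences of financial terms across letters
--
--     Args:
--         term_list: list of financial term names
--         letter_detail: letter detail dictionary
--
--     Returns:
--         dict of {term: [{letter_index: para_index}, ...]}
--     """
--     result = {}
--
--     for term in term_list:
--         term_entries = []
--         for letter_index, detail in letter_detail.items():
--             paragraph_indices = detail.get("financial_terms", {}).get(term)
--             if paragraph_indices:
--                 for para_index in paragraph_indices: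
--                     term_entries.append({letter_index: para_index})
--         if term_entries:
--             result[term] = term_entries
--
--     return result
-- ===== SOURCE B (Python) =====
-- def extract_financial_terms_from_letters(term_list, letter_detail):
--     """Single pass over the letters building a per-term index, then one
--     lookup per requested term (output in term_list order)."""
--     index = {}
--     for letter_index, detail in letter_detail.items():
--         for term, paragraph_indices in detail.get("financial_terms", {}).items():
--             if paragraph_indices:
--                 bucket = index.setdefault(term, [])
--                 for para_index in paragraph_indices:
--                     bucket.append({letter_index: para_index})
--     result = {}
--     for term in term_list:
--         if term in index:
--             result[term] = index[term]
--     return result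
-- ===== Notes on version B (the rewrite author's own statement) =====
-- stated objective: faster
-- what changed: Instead of rescanning every letter's financial_terms dict once per term (T*L dict lookups), B makes a single pass over the letters building a per-term index of {letter: para} entries, then answers each term in term_list with one index lookup.
import Mathlib
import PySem

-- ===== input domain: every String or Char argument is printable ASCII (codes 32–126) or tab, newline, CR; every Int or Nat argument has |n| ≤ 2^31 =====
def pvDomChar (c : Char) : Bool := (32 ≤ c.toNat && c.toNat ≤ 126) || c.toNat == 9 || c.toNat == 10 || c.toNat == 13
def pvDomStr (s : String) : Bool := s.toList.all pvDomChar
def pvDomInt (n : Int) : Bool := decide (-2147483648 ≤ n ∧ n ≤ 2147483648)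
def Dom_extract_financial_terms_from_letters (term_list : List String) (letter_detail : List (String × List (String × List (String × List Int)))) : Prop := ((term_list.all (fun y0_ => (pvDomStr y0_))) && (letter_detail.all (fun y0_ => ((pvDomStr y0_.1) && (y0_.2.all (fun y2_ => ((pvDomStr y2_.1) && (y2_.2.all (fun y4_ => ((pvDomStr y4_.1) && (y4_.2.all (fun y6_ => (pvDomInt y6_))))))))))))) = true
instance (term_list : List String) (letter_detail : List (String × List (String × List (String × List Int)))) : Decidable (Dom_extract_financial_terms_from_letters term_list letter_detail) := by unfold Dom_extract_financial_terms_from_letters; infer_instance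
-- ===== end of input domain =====

-- B replaces A's term-by-term rescan of all letters (O(T·L)) with one pass over the letters
-- that builds a per-term index, then one lookup per term (objective: faster, asymptotic).


-- ===== PORT A =====
-- 'for letter_index, detail in letter_detail.items()' iterates the dict's pairs in order,
-- i.e. exactly the association list itself; each dict lookup goes through PySem.Dict.
def extract_financial_terms_from_letters (term_list : List String) (letter_detail : List (String × List (String × List (String × List Int)))) : List (String × List (List (String × Int))) :=
  let result : PySem.Dict String (List (List (String × Int))) :=
    term_list.foldl (fun result term =>
      let term_entries : List (List (String × Int)) :=
        letter_detail.foldl (fun term_entries p =>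
          -- paragraph_indices = detail.get("financial_terms", {}).get(term); 'if paragraph_indices:' = some nonempty list
          match (PySem.Dict.mk (PySem.Dict.getD (PySem.Dict.mk p.2) "financial_terms" [])).get? term with
          | some paragraph_indices =>
              if paragraph_indices ≠ [] then
                paragraph_indices.foldl (fun term_entries para_index => term_entries ++ [[(p.1, para_index)]]) term_entries
              else term_entries
          | none => term_entries) []
      if term_entries ≠ [] then result.insert term term_entries else result) PySem.Dict.empty
  result.items

-- ===== PORT B =====
-- one pass over the letters: index[term] collects the {letter: para} singletons; then term_list order.
def extract_financial_terms_from_letters_alt (term_list : List String) (letter_detail : List (String × List (String × List (String × List Int)))) : List (String × List (List (String × Int))) :=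
  let index : PySem.Dict String (List (List (String × Int))) :=
    letter_detail.foldl (fun index p =>
      ((PySem.Dict.mk (PySem.Dict.getD (PySem.Dict.mk p.2) "financial_terms" [])).items).foldl (fun index q =>
        if q.2 ≠ [] then
          -- bucket = index.setdefault(term, []); bucket.append({letter_index: para_index}) for each para
          index.modify q.1 [] (fun bucket => q.2.foldl (fun bucket para_index => bucket ++ [[(p.1, para_index)]]) bucket)
        else index) index) PySem.Dict.empty
  let result : PySem.Dict String (List (List (String × Int))) :=
    term_list.foldl (fun result term =>
      match index.get? term with
      | some entries => result.insert term entries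
      | none => result) PySem.Dict.empty
  result.items

-- ===== PRECONDITION & SPEC =====
-- Pre_ excludes association lists in which a "financial_terms" inner dict carries a duplicate
-- term key: such a list does not represent any Python dict (dict keys are unique), and on it
-- A's first-match lookup and B's items() pass would read the pairs differently.
def Pre_extract_financial_terms_from_letters (term_list : List String) (letter_detail : List (String × List (String × List (String × List Int)))) : Prop :=
  ∀ p ∈ letter_detail, ∀ q ∈ p.2, q.1 = "financial_terms" → (q.2.map Prod.fst).Nodup
instance (term_list : List String) (letter_detail : List (String × List (String × List (String × List Int)))) : Decidable (Pre_extract_financial_terms_from_letters term_list letter_detail) := by unfold Pre_extract_financial_terms_from_letters; infer_instance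

def pvWitness_extract_financial_terms_from_letters : List String × (List (String × List (String × List (String × List Int)))) :=
  (["rev", "ebitda"], [("L0", [("financial_terms", [("rev", [1, 2])])]), ("L1", [("financial_terms", [("rev", [0])])])])

def Spec_extract_financial_terms_from_letters (term_list : List String) (letter_detail : List (String × List (String × List (String × List Int)))) (out : List (String × List (List (String × Int)))) : Prop := out = extract_financial_terms_from_letters_alt term_list letter_detail
instance (term_list : List String) (letter_detail : List (String × List (String × List (String × List Int)))) (out : List (String × List (List (String × Int)))) : Decidable (Spec_extract_financial_terms_from_letters term_list letter_detail out) := by unfold Spec_extract_financial_terms_from_letters; infer_instance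

-- ===== CLAIM (what is proved, stated in full; the proofs are below) =====
def Claim_equal_extract_financial_terms_from_letters : Prop := ∀ (term_list : List String) (letter_detail : List (String × List (String × List (String × List Int)))), Dom_extract_financial_terms_from_letters term_list letter_detail → Pre_extract_financial_terms_from_letters term_list letter_detail → Spec_extract_financial_terms_from_letters term_list letter_detail (extract_financial_terms_from_letters term_list letter_detail)

-- ===== LEMMAS AND PROOFS =====

-- detail.get("financial_terms", {}) of one letter
def pvFin (p : String × List (String × List (String × List Int))) : List (String × List Int) :=
  PySem.Dict.getD (PySem.Dict.mk p.2) "financial_terms" []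

-- the {letter: para} singletons one inner dict fl of letter li contributes to term t
def pvContribL (li : String) (t : String) (fl : List (String × List Int)) : List (List (String × Int)) :=
  match (PySem.Dict.mk fl).get? t with
  | some l => l.map (fun para => [(li, para)])
  | none => []

-- everything A collects for term t
def pvEntries (t : String) (letter_detail : List (String × List (String × List (String × List Int)))) : List (List (String × Int)) :=
  letter_detail.flatMap (fun p => pvContribL p.1 t (pvFin p))

theorem pv_get?_eq {κ ν : Type} [BEq κ] (d : PySem.Dict κ ν) (k : κ) (d0 : ν) :
    d.get? k = if d.contains k then some (d.getD k d0) else none := by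
  rw [PySem.Dict.contains_eq_isSome_get?, PySem.Dict.getD_eq_get?_getD]
  cases d.get? k <;> simp

theorem pv_get?_mk_none (fl : List (String × List Int)) (t : String)
    (h : t ∉ fl.map Prod.fst) : (PySem.Dict.mk fl).get? t = none := by
  rw [PySem.Dict.get?_eq_none_iff_not_mem_keys]
  simpa using h

theorem pvContribL_nil (li t : String) : pvContribL li t [] = [] := rfl

-- A's per-letter step equals appending the letter's contribution
theorem pv_stepA_eq (term : String) (p : String × List (String × List (String × List Int)))
    (acc : List (List (String × Int))) :
    (match (PySem.Dict.mk (PySem.Dict.getD (PySem.Dict.mk p.2) "financial_terms" [])).get? term with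
     | some paragraph_indices =>
         if paragraph_indices ≠ [] then
           paragraph_indices.foldl (fun te para_index => te ++ [[(p.1, para_index)]]) acc
         else acc
     | none => acc) = acc ++ pvContribL p.1 term (pvFin p) := by
  unfold pvContribL pvFin
  cases h : (PySem.Dict.mk (PySem.Dict.getD (PySem.Dict.mk p.2) "financial_terms" [])).get? term with
  | none => simp
  | some l =>
      by_cases hl : l = []
      · subst hl; simp
      · simp only [hl, ne_eq, not_false_eq_true, if_true,
          PySem.List.foldl_append_singleton_eq_map]

-- A's inner loop over the letters computes pvEntries
theorem pv_A_inner (term : String) (ld : List (String × List (String × List (String × List Int)))) :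
    (ld.foldl (fun term_entries p =>
      match (PySem.Dict.mk (PySem.Dict.getD (PySem.Dict.mk p.2) "financial_terms" [])).get? term with
      | some paragraph_indices =>
          if paragraph_indices ≠ [] then
            paragraph_indices.foldl (fun te para_index => te ++ [[(p.1, para_index)]]) term_entries
          else term_entries
      | none => term_entries) []) = pvEntries term ld := by
  have : ∀ acc, (ld.foldl (fun term_entries p =>
      match (PySem.Dict.mk (PySem.Dict.getD (PySem.Dict.mk p.2) "financial_terms" [])).get? term with
      | some paragraph_indices =>
          if paragraph_indices ≠ [] then
            paragraph_indices.foldl (fun te para_index => te ++ [[(p.1, para_index)]]) term_entries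
          else term_entries
      | none => term_entries) acc) = acc ++ pvEntries term ld := by
    induction ld with
    | nil => intro acc; simp [pvEntries]
    | cons p ld ih =>
        intro acc
        rw [List.foldl_cons, ih]
        simp only [pv_stepA_eq, pvEntries, List.flatMap_cons, List.append_assoc]
  simpa using this []

-- B's inner loop over one financial_terms dict: effect on bucket t
theorem pv_B_inner_getD (li t : String) (fl : List (String × List Int))
    (hnd : (fl.map Prod.fst).Nodup) (d : PySem.Dict String (List (List (String × Int)))) :
    (fl.foldl (fun index q =>
      if q.2 ≠ [] then
        index.modify q.1 [] (fun bucket => q.2.foldl (fun b para => b ++ [[(li, para)]]) bucket)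
      else index) d).getD t [] = d.getD t [] ++ pvContribL li t fl := by
  induction fl generalizing d with
  | nil => simp [pvContribL_nil]
  | cons q fl ih =>
      simp only [List.map_cons, List.nodup_cons] at hnd
      obtain ⟨hq, hnd⟩ := hnd
      have hcontrib : pvContribL li t (q :: fl) =
          (if t = q.1 then q.2.map (fun para => [(li, para)]) else []) ++ pvContribL li t fl := by
        unfold pvContribL
        rw [PySem.Dict.get?_mk_cons]
        by_cases ht : t = q.1
        · subst ht
          have hn : (PySem.Dict.mk fl).get? q.1 = none := pv_get?_mk_none fl q.1 hq
          simp [hn]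
        · have ht' : ¬ q.1 = t := fun h => ht h.symm
          simp [ht, ht']
      rw [List.foldl_cons, ih hnd, hcontrib]
      by_cases hq2 : q.2 = []
      · simp only [hq2, ne_eq, not_true_eq_false, if_false]
        by_cases ht : t = q.1 <;> simp [ht]
      · simp only [hq2, ne_eq, not_false_eq_true, if_true, PySem.Dict.getD_modify,
          PySem.List.foldl_append_singleton_eq_map]
        by_cases ht : t = q.1 <;> simp [ht]

theorem pv_B_inner_contains (li t : String) (fl : List (String × List Int))
    (hnd : (fl.map Prod.fst).Nodup) (d : PySem.Dict String (List (List (String × Int)))) :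
    (fl.foldl (fun index q =>
      if q.2 ≠ [] then
        index.modify q.1 [] (fun bucket => q.2.foldl (fun b para => b ++ [[(li, para)]]) bucket)
      else index) d).contains t = (d.contains t || decide (pvContribL li t fl ≠ [])) := by
  induction fl generalizing d with
  | nil => simp [pvContribL_nil]
  | cons q fl ih =>
      simp only [List.map_cons, List.nodup_cons] at hnd
      obtain ⟨hq, hnd⟩ := hnd
      have hcontrib : pvContribL li t (q :: fl) =
          (if t = q.1 then q.2.map (fun para => [(li, para)]) else []) ++ pvContribL li t fl := by
        unfold pvContribL
        rw [PySem.Dict.get?_mk_cons]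
        by_cases ht : t = q.1
        · subst ht
          have hn : (PySem.Dict.mk fl).get? q.1 = none := pv_get?_mk_none fl q.1 hq
          simp [hn]
        · have ht' : ¬ q.1 = t := fun h => ht h.symm
          simp [ht, ht']
      rw [List.foldl_cons, ih hnd, hcontrib]
      by_cases hq2 : q.2 = []
      · simp only [hq2, ne_eq, not_true_eq_false, if_false]
        by_cases ht : t = q.1 <;> simp [ht]
      · simp only [hq2, ne_eq, not_false_eq_true, if_true, PySem.Dict.contains_modify]
        by_cases ht : t = q.1
        · simp [ht, hq2]
        · have hb : (t == q.1) = false := beq_eq_false_iff_ne.mpr ht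
          simp [ht, hb]

-- B's index-building double loop, characterised at one key
theorem pv_B_build (t : String) (ld : List (String × List (String × List (String × List Int))))
    (hf : ∀ p ∈ ld, ((pvFin p).map Prod.fst).Nodup)
    (d : PySem.Dict String (List (List (String × Int)))) :
    (ld.foldl (fun index p =>
      ((PySem.Dict.mk (PySem.Dict.getD (PySem.Dict.mk p.2) "financial_terms" [])).items).foldl (fun index q =>
        if q.2 ≠ [] then
          index.modify q.1 [] (fun bucket => q.2.foldl (fun b para => b ++ [[(p.1, para)]]) bucket)
        else index) index) d).getD t [] = d.getD t [] ++ pvEntries t ld ∧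
    (ld.foldl (fun index p =>
      ((PySem.Dict.mk (PySem.Dict.getD (PySem.Dict.mk p.2) "financial_terms" [])).items).foldl (fun index q =>
        if q.2 ≠ [] then
          index.modify q.1 [] (fun bucket => q.2.foldl (fun b para => b ++ [[(p.1, para)]]) bucket)
        else index) index) d).contains t = (d.contains t || decide (pvEntries t ld ≠ [])) := by
  induction ld generalizing d with
  | nil => simp [pvEntries]
  | cons p ld ih =>
      have hp : ((pvFin p).map Prod.fst).Nodup := hf p (List.mem_cons_self ..)
      have hrest := ih (fun r hr => hf r (List.mem_cons_of_mem _ hr))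
      have hitems : (PySem.Dict.mk (PySem.Dict.getD (PySem.Dict.mk p.2) "financial_terms" [])).items = pvFin p := rfl
      constructor
      · rw [List.foldl_cons, (hrest _).1, hitems, pv_B_inner_getD p.1 t (pvFin p) hp d]
        simp [pvEntries, List.append_assoc, pvFin]
      · rw [List.foldl_cons, (hrest _).2, hitems, pv_B_inner_contains p.1 t (pvFin p) hp d]
        have he : pvEntries t (p :: ld) = pvContribL p.1 t (pvFin p) ++ pvEntries t ld := by
          simp [pvEntries, pvFin]
        rw [Bool.or_assoc]
        congr 1
        rw [← Bool.decide_or, decide_eq_decide, he]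
        simp [List.append_eq_nil_iff]
        tauto

-- B's index, fully characterised: get? t answers with A's pvEntries
theorem pv_B_index_get? (t : String) (ld : List (String × List (String × List (String × List Int))))
    (hpre : ∀ p ∈ ld, ∀ q ∈ p.2, q.1 = "financial_terms" → (q.2.map Prod.fst).Nodup) :
    (ld.foldl (fun index p =>
      ((PySem.Dict.mk (PySem.Dict.getD (PySem.Dict.mk p.2) "financial_terms" [])).items).foldl (fun index q =>
        if q.2 ≠ [] then
          index.modify q.1 [] (fun bucket => q.2.foldl (fun b para => b ++ [[(p.1, para)]]) bucket)
        else index) index) PySem.Dict.empty).get? t =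
      if pvEntries t ld ≠ [] then some (pvEntries t ld) else none := by
  have hfin : ∀ p ∈ ld, ((pvFin p).map Prod.fst).Nodup := by
    intro p hp
    unfold pvFin
    cases h : (PySem.Dict.mk p.2).get? "financial_terms" with
    | none =>
        rw [PySem.Dict.getD_of_get?_eq_none _ _ h]
        simp
    | some v =>
        rw [PySem.Dict.getD_of_get?_eq_some _ _ h]
        exact hpre p hp ("financial_terms", v) (PySem.Dict.mem_items_of_get?_eq_some _ h) rfl
  have hres := pv_B_build t ld hfin PySem.Dict.empty
  rw [pv_get?_eq _ t [], hres.2, hres.1]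
  by_cases h : pvEntries t ld = [] <;> simp [h]

-- ===== VERDICT (by name: the statement is the Claim_ definition above) =====
theorem extract_financial_terms_from_letters_spec : Claim_equal_extract_financial_terms_from_letters := by
  intro term_list letter_detail _hdom hpre
  unfold Spec_extract_financial_terms_from_letters
  unfold extract_financial_terms_from_letters extract_financial_terms_from_letters_alt
  simp only
  congr 1
  apply List.foldl_ext
  intro res term _
  rw [pv_A_inner, pv_B_index_get? term letter_detail hpre]
  by_cases h : pvEntries term letter_detail = [] <;> simp [h]
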